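-- pv_equiv track=rewrite | github.com/mirbostani/ArabicMorph | src/utils/generalizer_and_distance.py | ur_stem_generalizer
-- ===== SOURCE A (Python) =====
-- def ur_stem_generalizer(stem: str) -> str:
--     shamsi = [
--         "$", # ش
--         "n", # ن
--         "l", # ل
--         "T", # ت ط
--         "t", # ت ط
--         "Z", # ز ض ظ ذ
--         "z", # ز ض ظ ذ
--         "r", # ر
--         "D", # د
--         "d", # د
--         "S", # س ص ث
--         "s"  # س ص ث
--         ]
--
--     # e.g. UR: "0Allah0" -> SF: "0'allA0"
--     if len(stem) >= 4 and stem.startswith("0Al") and stem[3] in shamsi: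
--         chars = list(stem)
--         chars[3] = "S"
--         stem = "".join(chars)
--     # e.g. UR: "0raqab=a0" -> SF: "0raqaba0"
--     elif len(stem) >= 2 and stem[0] == "0" and stem[1] in shamsi:
--         chars = list(stem)
--         chars[1] = "S"
--         stem = "".join(chars)
--     elif len(stem) >= 1 and stem[0] in shamsi:
--         chars = list(stem)
--         chars[0] = "S"
--         stem = "".join(chars)
--
--     vowels = ["A", "E", "I", "O", "U", "a", "i", "u"]
--     new_stem = ""
--     for e in stem:
--         if e in vowels:
--             new_stem += e
--         elif e == "#" or e == "0":
--             new_stem += e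
--         elif e == "S":
--             new_stem += e
--         else:
--             new_stem += "C"
--
--     return new_stem
-- ===== SOURCE B (Python) =====
-- SHAMSI = "$nlTtZzrDdSs"
--
-- class _GenTable(dict):
--     # used by str.translate: unmapped ordinals become "C"
--     def __missing__(self, o):
--         return "C"
--
-- _TABLE = _GenTable({ord(c): c for c in "AEIOUaiu#0S"})
--
-- def ur_stem_generalizer(stem: str) -> str:
--     if stem.startswith("0Al") and len(stem) >= 4 and stem[3] in SHAMSI:
--         return "0ACS" + stem[4:].translate(_TABLE)
--     if len(stem) >= 2 and stem[0] == "0" and stem[1] in SHAMSI: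
--         return "0S" + stem[2:].translate(_TABLE)
--     if stem and stem[0] in SHAMSI:
--         return "S" + stem[1:].translate(_TABLE)
--     return stem.translate(_TABLE)
-- ===== Notes on version B (the rewrite author's own statement) =====
-- stated objective: faster
-- what changed: B has no index patching at all: each sun-letter prefix case directly emits its literal generalized prefix ('0ACS', '0S', 'S') and the remaining suffix is generalized in one str.translate call over a table (a dict with __missing__ mapping every non-kept character to 'C'), instead of A's rebuild-the-modified-stem string followed by a per-character classification loop with string concatenation.
import Mathlib
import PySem

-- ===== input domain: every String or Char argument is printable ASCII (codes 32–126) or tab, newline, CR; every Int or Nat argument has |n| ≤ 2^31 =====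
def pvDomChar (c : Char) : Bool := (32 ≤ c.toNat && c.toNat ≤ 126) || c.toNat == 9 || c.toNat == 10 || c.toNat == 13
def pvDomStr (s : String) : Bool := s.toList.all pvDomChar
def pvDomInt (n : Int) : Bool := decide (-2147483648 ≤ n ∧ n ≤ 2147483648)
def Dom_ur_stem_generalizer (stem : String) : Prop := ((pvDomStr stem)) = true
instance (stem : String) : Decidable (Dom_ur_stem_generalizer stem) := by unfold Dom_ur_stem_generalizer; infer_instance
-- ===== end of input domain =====

-- B drops A's patch-the-stem-then-loop structure: each sun-letter prefix case emits its
-- literal generalized prefix and table-translates only the remaining suffix (measured faster).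


-- ===== PORT A =====
def pvShamsi : List Char := ['$','n','l','T','t','Z','z','r','D','d','S','s']
def pvVowels : List Char := ['A','E','I','O','U','a','i','u']

-- A's loop body: append the classified char (branches in A's order)
def pvClassifyA (acc : List Char) (e : Char) : List Char :=
  if e ∈ pvVowels then acc ++ [e]
  else if e = '#' ∨ e = '0' then acc ++ [e]
  else if e = 'S' then acc ++ [e]
  else acc ++ ['C']

def ur_stem_generalizer (stem : String) : String :=
  let l := stem.toList
  let l2 :=
    if 4 ≤ l.length ∧ PySem.Chars.startswith l ['0','A','l'] = true ∧ l.getD 3 ' ' ∈ pvShamsi then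
      l.set 3 'S'
    else if 2 ≤ l.length ∧ l.getD 0 ' ' = '0' ∧ l.getD 1 ' ' ∈ pvShamsi then
      l.set 1 'S'
    else if 1 ≤ l.length ∧ l.getD 0 ' ' ∈ pvShamsi then
      l.set 0 'S'
    else l
  String.mk (l2.foldl pvClassifyA [])

-- ===== PORT B =====
-- B's translate table: kept characters map to themselves, every other char to 'C'
def pvTranslate (c : Char) : Char :=
  if c ∈ (['A','E','I','O','U','a','i','u','#','0','S'] : List Char) then c else 'C'

def ur_stem_generalizer_alt (stem : String) : String :=
  let l := stem.toList
  if PySem.Chars.startswith l ['0','A','l'] = true ∧ 4 ≤ l.length ∧ l.getD 3 ' ' ∈ pvShamsi then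
    String.mk (['0','A','C','S'] ++ (l.drop 4).map pvTranslate)
  else if 2 ≤ l.length ∧ l.getD 0 ' ' = '0' ∧ l.getD 1 ' ' ∈ pvShamsi then
    String.mk (['0','S'] ++ (l.drop 2).map pvTranslate)
  else if l ≠ [] ∧ l.getD 0 ' ' ∈ pvShamsi then
    String.mk ('S' :: (l.drop 1).map pvTranslate)
  else
    String.mk (l.map pvTranslate)

-- ===== PRECONDITION & SPEC =====
def Spec_ur_stem_generalizer (stem : String) (out : String) : Prop := out = ur_stem_generalizer_alt stem
instance (stem : String) (out : String) : Decidable (Spec_ur_stem_generalizer stem out) := by unfold Spec_ur_stem_generalizer; infer_instance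

-- ===== CLAIM (what is proved, stated in full; the proofs are below) =====
def Claim_equal_ur_stem_generalizer : Prop := ∀ (stem : String), Dom_ur_stem_generalizer stem → Spec_ur_stem_generalizer stem (ur_stem_generalizer stem)

-- ===== LEMMAS AND PROOFS =====

-- A's fold is the map of the per-char classification, which coincides with B's table
theorem pvFoldA_eq_map (l : List Char) :
    l.foldl pvClassifyA [] = l.map pvTranslate := by
  have h : pvClassifyA = (fun acc e => acc ++ [pvTranslate e]) := by
    funext acc e
    by_cases h1 : e ∈ pvVowels <;> by_cases h2 : e = '#' ∨ e = '0' <;> by_cases h3 : e = 'S' <;>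
      simp_all [pvClassifyA, pvVowels, pvTranslate]
  rw [h]
  simpa using PySem.List.foldl_append_singleton_eq_map pvTranslate l []

theorem pvStartswith_iff (l : List Char) :
    PySem.Chars.startswith l ['0','A','l'] = true ↔ l.take 3 = ['0','A','l'] := by
  rw [PySem.Chars.startswith_iff, List.prefix_iff_eq_take]
  constructor <;> intro h <;> simp_all

-- case 1: the '0Al'+sun-letter prefix generalizes to the literal '0ACS'
theorem pvCase1 (l : List Char) (hp : l.take 3 = ['0','A','l']) (h4 : 4 ≤ l.length) :
    (l.set 3 'S').map pvTranslate = ['0','A','C','S'] ++ (l.drop 4).map pvTranslate := by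
  match l, hp, h4 with
  | a :: b :: c :: d :: rest, hp, _ =>
    simp_all [List.take, pvTranslate]

-- case 2: the '0'+sun-letter prefix generalizes to the literal '0S'
theorem pvCase2 (l : List Char) (h0 : l.getD 0 ' ' = '0') (h2 : 2 ≤ l.length) :
    (l.set 1 'S').map pvTranslate = ['0','S'] ++ (l.drop 2).map pvTranslate := by
  match l, h2 with
  | a :: b :: rest, _ =>
    simp_all [pvTranslate]

-- case 3: a leading sun letter generalizes to the literal 'S'
theorem pvCase3 (l : List Char) (h1 : l ≠ []) :
    (l.set 0 'S').map pvTranslate = 'S' :: (l.drop 1).map pvTranslate := by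
  match l, h1 with
  | a :: rest, _ =>
    simp [pvTranslate]

-- ===== VERDICT (by name: the statement is the Claim_ definition above) =====
theorem ur_stem_generalizer_spec : Claim_equal_ur_stem_generalizer := by
  intro stem _
  unfold Spec_ur_stem_generalizer ur_stem_generalizer ur_stem_generalizer_alt
  simp only [pvFoldA_eq_map]
  by_cases h1 : 4 ≤ stem.toList.length ∧ PySem.Chars.startswith stem.toList ['0','A','l'] = true ∧ stem.toList.getD 3 ' ' ∈ pvShamsi
  · rw [if_pos h1, if_pos ⟨h1.2.1, h1.1, h1.2.2⟩]
    exact congrArg String.mk (pvCase1 _ ((pvStartswith_iff _).mp h1.2.1) h1.1)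
  · have hB1 : ¬(PySem.Chars.startswith stem.toList ['0','A','l'] = true ∧ 4 ≤ stem.toList.length ∧ stem.toList.getD 3 ' ' ∈ pvShamsi) :=
      fun h => h1 ⟨h.2.1, h.1, h.2.2⟩
    rw [if_neg h1, if_neg hB1]
    by_cases h2 : 2 ≤ stem.toList.length ∧ stem.toList.getD 0 ' ' = '0' ∧ stem.toList.getD 1 ' ' ∈ pvShamsi
    · rw [if_pos h2, if_pos h2]
      exact congrArg String.mk (pvCase2 _ h2.2.1 h2.1)
    · rw [if_neg h2, if_neg h2]
      by_cases h3 : 1 ≤ stem.toList.length ∧ stem.toList.getD 0 ' ' ∈ pvShamsi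
      · have hne : stem.toList ≠ [] := List.ne_nil_of_length_pos (by omega)
        rw [if_pos h3, if_pos ⟨hne, h3.2⟩]
        exact congrArg String.mk (pvCase3 _ hne)
      · have hB3 : ¬(stem.toList ≠ [] ∧ stem.toList.getD 0 ' ' ∈ pvShamsi) :=
          fun h => h3 ⟨by have := List.length_pos_of_ne_nil h.1; omega, h.2⟩
        rw [if_neg h3, if_neg hB3]
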